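-- pv_equiv track=rewrite | github.com/srina1h/magma_ezr | scripts/plot_benchmark.py | cumulative_bugs_curve
-- ===== SOURCE A (Python) =====
-- def cumulative_bugs_curve(triggered_dict, poll_resolution=5):
--     """From one run's triggered dict (bug_id -> first trigger time in sec), return (times, counts)."""
--     if not triggered_dict:
--         return [0], [0]
--     times_sorted = sorted(triggered_dict.values())
--     # At each first-trigger time T, cumulative count goes up by 1
--     out_t = [0]
--     out_c = [0]
--     for t in times_sorted:
--         out_t.append(t)
--         out_c.append(out_c[-1] + 1)
--     return out_t, out_c
-- ===== SOURCE B (Python) =====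
-- def cumulative_bugs_curve(triggered_dict, poll_resolution=5):
--     """From one run's triggered dict (bug_id -> first trigger time in sec), return (times, counts)."""
--     freq = {}
--     for v in triggered_dict.values():
--         freq[v] = freq.get(v, 0) + 1
--     out_t = [0]
--     out_c = [0]
--     total = 0
--     for t in sorted(freq):
--         m = freq[t]
--         out_t.extend([t] * m)
--         out_c.extend(range(total + 1, total + m + 1))
--         total += m
--     return out_t, out_c
-- ===== Notes on version B (the rewrite author's own statement) =====
-- stated objective: alternative
-- what changed: B builds a frequency dict of trigger times, sorts only the distinct times, and emits each group wholesale ([t]*m plus the count range total+1..total+m), instead of A's sorting the full value list and appending one element per value with an out_c[-1]+1 accumulator.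
import Mathlib
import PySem

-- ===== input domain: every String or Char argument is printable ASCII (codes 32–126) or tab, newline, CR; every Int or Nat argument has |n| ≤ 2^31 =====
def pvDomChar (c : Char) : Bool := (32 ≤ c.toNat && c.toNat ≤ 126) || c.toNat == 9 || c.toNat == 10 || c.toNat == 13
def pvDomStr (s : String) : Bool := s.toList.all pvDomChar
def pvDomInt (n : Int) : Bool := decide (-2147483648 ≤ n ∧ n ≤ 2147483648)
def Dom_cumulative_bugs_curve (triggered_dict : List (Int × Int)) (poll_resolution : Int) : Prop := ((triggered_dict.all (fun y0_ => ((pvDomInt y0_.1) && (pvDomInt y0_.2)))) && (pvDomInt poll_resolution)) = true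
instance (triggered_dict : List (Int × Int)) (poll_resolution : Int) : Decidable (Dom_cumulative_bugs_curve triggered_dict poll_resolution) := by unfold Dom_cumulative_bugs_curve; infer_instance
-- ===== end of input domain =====

-- B counts occurrences of each trigger time in a dict, sorts only the DISTINCT times, and emits each
-- group at once ([t]*m and the count range total+1..total+m) instead of A's per-element append loop
-- over the fully sorted value list (objective: alternative).

-- ===== PORT A =====
def cumulative_bugs_curve (triggered_dict : List (Int × Int)) (poll_resolution : Int) : List Int × List Int :=
  if triggered_dict = [] then ([0], [0])
  else
    let times_sorted := PySem.List.sorted (triggered_dict.map (fun kv => kv.2)) (fun x => x) false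
    times_sorted.foldl
      (fun (st : List Int × List Int) t =>
        (st.1 ++ [t], st.2 ++ [((PySem.List.pyGet? st.2 (-1)).getD 0) + 1]))
      ([0], [0])

-- ===== PORT B =====
def cumulative_bugs_curve_alt (triggered_dict : List (Int × Int)) (poll_resolution : Int) : List Int × List Int :=
  let freq := (triggered_dict.map (fun kv => kv.2)).foldl
      (fun (d : PySem.Dict Int Int) v => d.insert v (d.getD v 0 + 1)) PySem.Dict.empty
  let r := (PySem.List.sorted freq.keys (fun x => x) false).foldl
      (fun (st : List Int × List Int × Int) t =>
        let m := freq.getD t 0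
        (st.1 ++ List.replicate m.toNat t,
         st.2.1 ++ PySem.List.pyRange (st.2.2 + 1) (st.2.2 + m + 1) 1,
         st.2.2 + m))
      ([0], [0], 0)
  (r.1, r.2.1)

-- ===== PRECONDITION & SPEC =====
def Spec_cumulative_bugs_curve (triggered_dict : List (Int × Int)) (poll_resolution : Int) (out : List Int × List Int) : Prop := out = cumulative_bugs_curve_alt triggered_dict poll_resolution
instance (triggered_dict : List (Int × Int)) (poll_resolution : Int) (out : List Int × List Int) : Decidable (Spec_cumulative_bugs_curve triggered_dict poll_resolution out) := by unfold Spec_cumulative_bugs_curve; infer_instance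

-- ===== CLAIM =====
def Claim_equal_cumulative_bugs_curve : Prop := ∀ (triggered_dict : List (Int × Int)) (poll_resolution : Int), Dom_cumulative_bugs_curve triggered_dict poll_resolution → Spec_cumulative_bugs_curve triggered_dict poll_resolution (cumulative_bugs_curve triggered_dict poll_resolution)

-- ===== LEMMAS AND PROOFS =====

-- range(k+2) mapped through (n + ·) peels off n in front, shifting the base to n+1.
theorem cbc_range (n : Int) (k : Nat) :
    (List.range (k + 1 + 1)).map (fun i : Nat => n + (i : Int))
    = n :: (List.range (k + 1)).map (fun i : Nat => n + 1 + (i : Int)) := by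
  rw [List.range_succ_eq_map, List.map_cons, List.map_map]
  refine congrArg₂ _ (by simp) (List.map_congr_left ?_)
  intro i _
  simp only [Function.comp]
  push_cast
  ring

-- A's loop invariant: the fold with the [-1]-lookup accumulator appends the times and
-- the counts n+1, …, n+len.
theorem cbc_fold (ts : List Int) : ∀ (t0 c : List Int) (n : Int),
    ts.foldl
      (fun (st : List Int × List Int) t =>
        (st.1 ++ [t], st.2 ++ [((PySem.List.pyGet? st.2 (-1)).getD 0) + 1]))
      (t0, c ++ [n])
    = (t0 ++ ts, c ++ (List.range (ts.length + 1)).map (fun i : Nat => n + (i : Int))) := by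
  induction ts with
  | nil => intro t0 c n; simp [List.range_succ]
  | cons t ts ih =>
    intro t0 c n
    simp only [List.foldl_cons, PySem.List.pyGet?_neg_one_append_singleton, Option.getD_some]
    rw [ih (t0 ++ [t]) (c ++ [n]) (n + 1)]
    simp only [List.length_cons]
    rw [cbc_range n ts.length]
    simp [List.append_assoc]

-- pyRange with step 1 over a nonneg length is range mapped up.
theorem cbc_pyRange (a : Int) (m : Nat) :
    PySem.List.pyRange a (a + (m : Int)) 1 = (List.range m).map (fun i : Nat => a + (i : Int)) := by
  induction m generalizing a with
  | zero => simp [PySem.List.pyRange]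
  | succ k ih =>
    rw [PySem.List.pyRange_one_cons (by push_cast; omega)]
    have : a + ((k + 1 : Nat) : Int) = (a + 1) + (k : Int) := by push_cast; ring
    rw [this, ih (a + 1), List.range_succ_eq_map, List.map_cons, List.map_map]
    refine congrArg₂ _ (by simp) (List.map_congr_left ?_)
    intro i _
    simp only [Function.comp]
    push_cast
    ring

-- B's group loop invariant.
theorem cbc_fold_alt (freq : PySem.Dict Int Int) : ∀ (ks : List Int),
    (∀ t ∈ ks, 0 ≤ freq.getD t 0) → ∀ (t0 c : List Int) (tot : Int),
    ks.foldl
      (fun (st : List Int × List Int × Int) t =>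
        let m := freq.getD t 0
        (st.1 ++ List.replicate m.toNat t,
         st.2.1 ++ PySem.List.pyRange (st.2.2 + 1) (st.2.2 + m + 1) 1,
         st.2.2 + m))
      (t0, c, tot)
    = (t0 ++ ks.flatMap (fun t => List.replicate (freq.getD t 0).toNat t),
       c ++ (List.range ((ks.map (fun t => (freq.getD t 0).toNat)).sum)).map
              (fun i : Nat => tot + 1 + (i : Int)),
       tot + (((ks.map (fun t => (freq.getD t 0).toNat)).sum : Nat) : Int)) := by
  intro ks
  induction ks with
  | nil => intro _ t0 c tot; simp
  | cons t ks ih =>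
    intro hnn t0 c tot
    have hm : 0 ≤ freq.getD t 0 := hnn t (by simp)
    simp only [List.foldl_cons]
    rw [ih (fun x hx => hnn x (by simp [hx]))]
    have hmc : ((freq.getD t 0).toNat : Int) = freq.getD t 0 := Int.toNat_of_nonneg hm
    have hr : PySem.List.pyRange (tot + 1) (tot + freq.getD t 0 + 1) 1
        = (List.range (freq.getD t 0).toNat).map (fun i : Nat => tot + 1 + (i : Int)) := by
      have : tot + freq.getD t 0 + 1 = (tot + 1) + ((freq.getD t 0).toNat : Int) := by omega
      rw [this, cbc_pyRange]
    refine Prod.ext ?_ (Prod.ext ?_ ?_)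
    · simp [List.append_assoc]
    · simp only [List.map_cons, List.sum_cons, List.range_add, List.map_append, List.map_map,
        List.append_assoc, hr]
      refine congrArg _ (congrArg _ (List.map_congr_left ?_))
      intro i _
      simp only [Function.comp]
      push_cast [hmc]
      ring
    · simp only [List.map_cons, List.sum_cons]
      push_cast
      omega

-- Element count of the multiplicity expansion over a nodup key list.
theorem cbc_count_flatMap (vals : List Int) (a : Int) : ∀ (ks : List Int), ks.Nodup →
    (ks.flatMap (fun t => List.replicate (vals.count t) t)).count a
    = if a ∈ ks then vals.count a else 0 := by
  intro ks
  induction ks with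
  | nil => simp
  | cons t ks ih =>
    intro hnd
    rw [List.nodup_cons] at hnd
    simp only [List.flatMap_cons, List.count_append, List.count_replicate, ih hnd.2]
    by_cases hat : a = t
    · subst hat
      simp [hnd.1]
    · simp [hat, Ne.symm hat]

-- The expansion is a permutation of the values.
theorem cbc_perm_flatMap (vals : List Int) (ks : List Int) (hnd : ks.Nodup)
    (hmem : ∀ a, a ∈ ks ↔ a ∈ vals) :
    (ks.flatMap (fun t => List.replicate (vals.count t) t)).Perm vals := by
  rw [List.perm_iff_count]
  intro a
  rw [cbc_count_flatMap vals a ks hnd]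
  by_cases h : a ∈ ks
  · simp [h]
  · simp [h, List.count_eq_zero.mpr (fun hv => h ((hmem a).mpr hv))]

-- The expansion over strictly increasing keys is weakly increasing.
theorem cbc_pairwise_flatMap (m : Int → Nat) : ∀ (ks : List Int), ks.Pairwise (· < ·) →
    (ks.flatMap (fun t => List.replicate (m t) t)).Pairwise (· ≤ ·) := by
  intro ks
  induction ks with
  | nil => simp
  | cons t ks ih =>
    intro hp
    rw [List.pairwise_cons] at hp
    simp only [List.flatMap_cons]
    rw [List.pairwise_append]
    refine ⟨List.pairwise_replicate.mpr (Or.inr le_rfl), ih hp.2, ?_⟩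
    intro a ha b hb
    rw [List.eq_of_mem_replicate ha]
    rcases List.mem_flatMap.mp hb with ⟨t', ht', hb'⟩
    rw [List.eq_of_mem_replicate hb']
    exact le_of_lt (hp.1 t' ht')

-- Summing the multiplicities over the distinct keys recovers the length.
theorem cbc_sum_counts (vals : List Int) (ks : List Int) (hnd : ks.Nodup)
    (hmem : ∀ a, a ∈ ks ↔ a ∈ vals) :
    (ks.map (fun t => vals.count t)).sum = vals.length := by
  have hperm : ks.Perm vals.dedup := by
    rw [List.perm_ext_iff_of_nodup hnd vals.nodup_dedup]
    intro a
    rw [hmem, List.mem_dedup]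
  calc (ks.map (fun t => vals.count t)).sum
      = (vals.dedup.map (fun t => vals.count t)).sum := (hperm.map _).sum_eq
    _ = vals.length := List.sum_map_count_dedup_eq_length vals

-- ===== VERDICT =====
theorem cumulative_bugs_curve_spec : Claim_equal_cumulative_bugs_curve := by
  intro td pr _
  unfold Spec_cumulative_bugs_curve cumulative_bugs_curve cumulative_bugs_curve_alt
  set vals := td.map (fun kv => kv.2) with hvals
  have hfreq : vals.foldl (fun (d : PySem.Dict Int Int) v => d.insert v (d.getD v 0 + 1))
      PySem.Dict.empty = PySem.Dict.counter vals :=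
    PySem.Dict.foldl_insert_getD_add_one_eq_counter vals
  simp only [hfreq, PySem.Dict.keys_counter]
  set ks := PySem.List.sorted (PySem.Set.ofList vals) (fun x => x) false with hks
  have hknd : ks.Nodup := by
    rw [hks]
    exact (PySem.List.sorted_perm _ _ _).nodup_iff.mpr (PySem.Set.nodup_ofList vals)
  have hkmem : ∀ a, a ∈ ks ↔ a ∈ vals := by
    intro a
    rw [hks, PySem.List.mem_sorted, PySem.Set.mem_ofList]
  have hkslt : ks.Pairwise (· < ·) := by
    rw [hks]; exact PySem.List.sorted_ofList_pairwise_lt vals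
  rw [cbc_fold_alt (PySem.Dict.counter vals) ks
    (fun t _ => by simp [PySem.Dict.getD_counter])]
  simp only [PySem.Dict.getD_counter, Int.toNat_natCast]
  have hflat : ks.flatMap (fun t => List.replicate (vals.count t) t)
      = PySem.List.sorted vals (fun x => x) false := by
    have h1 := cbc_perm_flatMap vals ks hknd hkmem
    have h2 := cbc_pairwise_flatMap (fun t => vals.count t) ks hkslt
    exact (PySem.List.sorted_id_eq_of_perm_of_pairwise _ _ h1 h2).symm
  have hsum : (ks.map (fun t => vals.count t)).sum = vals.length :=
    cbc_sum_counts vals ks hknd hkmem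
  by_cases h : td = []
  · subst h
    have : vals = [] := by simp [hvals]
    simp_all [PySem.List.sorted, PySem.Set.ofList]
  · simp only [if_neg h]
    have h0 := cbc_fold (PySem.List.sorted vals (fun x => x) false) [0] [] 0
    simp only [List.nil_append] at h0
    rw [h0, hflat, hsum, PySem.List.length_sorted]
    refine Prod.ext rfl ?_
    show (List.range (vals.length + 1)).map (fun i : Nat => 0 + (i : Int))
        = 0 :: (List.range vals.length).map (fun i : Nat => 0 + 1 + (i : Int))
    rw [List.range_succ_eq_map, List.map_cons, List.map_map]
    refine congrArg₂ _ (by simp) (List.map_congr_left ?_)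
    intro i _
    simp only [Function.comp]
    push_cast
    ring
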